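-- pv_equiv track=rewrite | github.com/thealper2/codewars-solutions | 7-kyu/simple_fun_399_make_ascending_sequences.py | make_sequences
-- ===== SOURCE A (Python) =====
-- def make_sequences(n):
--     dp = [0] * (n + 1)
--     dp[1] = 1
--
--     for i in range(2, n + 1):
--         dp[i] = 1
--         for k in range(1, i // 2 + 1):
--             dp[i] += dp[k]
--
--     return dp[n]
-- ===== SOURCE B (Python) =====
-- def make_sequences(n):
--     dp = [0] * (n + 1)
--     pref = [0] * (n + 1)
--     dp[1] = 1
--     pref[1] = 1
--     for i in range(2, n + 1):
--         dp[i] = 1 + pref[i // 2]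
--         pref[i] = pref[i - 1] + dp[i]
--     return dp[n]
-- ===== Notes on version B (the rewrite author's own statement) =====
-- stated objective: faster
-- what changed: Replaces the quadratic inner summation loop with a running prefix-sum array so each dp[i] is computed as 1 + pref[i//2] in O(1).
import Mathlib
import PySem

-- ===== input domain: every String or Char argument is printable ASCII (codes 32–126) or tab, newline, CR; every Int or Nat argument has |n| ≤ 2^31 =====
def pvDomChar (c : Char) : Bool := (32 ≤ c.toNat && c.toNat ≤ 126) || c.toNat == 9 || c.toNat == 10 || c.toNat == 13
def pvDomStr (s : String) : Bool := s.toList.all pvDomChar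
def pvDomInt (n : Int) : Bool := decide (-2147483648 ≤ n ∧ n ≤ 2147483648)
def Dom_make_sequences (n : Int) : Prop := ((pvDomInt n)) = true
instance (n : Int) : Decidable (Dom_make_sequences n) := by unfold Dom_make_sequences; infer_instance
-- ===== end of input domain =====

-- B replaces A's quadratic inner summation loop by a running prefix-sum array (dp[i] = 1 + pref[i//2]); O(n) vs O(n^2), measured faster.
-- All list indices used by both programs are nonnegative and in range on Pre_, so List.set/List.getD at .toNat is exact here.

-- ===== PORT A =====
-- inner loop body: dp[i] += dp[k]   (Python list -> Array; indices nonneg & in range on Pre_)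
def pvInnerA (i : Int) (dp : Array Int) (k : Int) : Array Int :=
  dp.setIfInBounds i.toNat (dp.getD i.toNat 0 + dp.getD k.toNat 0)

-- outer loop body: dp[i] = 1; for k in range(1, i//2+1): dp[i] += dp[k]
def pvStepA (dp : Array Int) (i : Int) : Array Int :=
  (PySem.List.pyRange 1 (PySem.Int.floordiv i 2 + 1) 1).foldl (pvInnerA i) (dp.setIfInBounds i.toNat 1)

def make_sequences (n : Int) : Int :=
  ((PySem.List.pyRange 2 (n + 1) 1).foldl pvStepA
    ((Array.replicate (n + 1).toNat 0).setIfInBounds 1 1)).getD n.toNat 0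

-- ===== PORT B =====
-- loop body: dp[i] = 1 + pref[i//2]; pref[i] = pref[i-1] + dp[i]
def pvStepB (s : Array Int × Array Int) (i : Int) : Array Int × Array Int :=
  let dp := s.1.setIfInBounds i.toNat (1 + s.2.getD (PySem.Int.floordiv i 2).toNat 0)
  let pref := s.2.setIfInBounds i.toNat (s.2.getD (i - 1).toNat 0 + dp.getD i.toNat 0)
  (dp, pref)

def make_sequences_alt (n : Int) : Int :=
  (((PySem.List.pyRange 2 (n + 1) 1).foldl pvStepB
    ((Array.replicate (n + 1).toNat 0).setIfInBounds 1 1,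
     (Array.replicate (n + 1).toNat 0).setIfInBounds 1 1)).1).getD n.toNat 0

-- ===== PRECONDITION & SPEC =====
-- A (and B) raise IndexError on n <= 0 ('dp[1] = 1' with len(dp) <= 1); Pre_ excludes exactly those inputs.
def Pre_make_sequences (n : Int) : Prop := 1 ≤ n
instance (n : Int) : Decidable (Pre_make_sequences n) := by unfold Pre_make_sequences; infer_instance
def pvWitness_make_sequences : Int := 5

def Spec_make_sequences (n : Int) (out : Int) : Prop := out = make_sequences_alt n
instance (n : Int) (out : Int) : Decidable (Spec_make_sequences n out) := by unfold Spec_make_sequences; infer_instance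

-- ===== CLAIM (what is proved, stated in full; the proofs are below) =====
def Claim_equal_make_sequences : Prop := ∀ (n : Int), Dom_make_sequences n → Pre_make_sequences n → Spec_make_sequences n (make_sequences n)

-- ===== LEMMAS AND PROOFS =====

-- list-level models of the two loop bodies (proof only)
def pvInnerAL (i : Int) (dp : List Int) (k : Int) : List Int :=
  dp.set i.toNat (dp.getD i.toNat 0 + dp.getD k.toNat 0)

def pvStepAL (dp : List Int) (i : Int) : List Int :=
  (PySem.List.pyRange 1 (PySem.Int.floordiv i 2 + 1) 1).foldl (pvInnerAL i) (dp.set i.toNat 1)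

def pvStepBL (s : List Int × List Int) (i : Int) : List Int × List Int :=
  let dp := s.1.set i.toNat (1 + s.2.getD (PySem.Int.floordiv i 2).toNat 0)
  let pref := s.2.set i.toNat (s.2.getD (i - 1).toNat 0 + dp.getD i.toNat 0)
  (dp, pref)

-- bridge: Array.getD / setIfInBounds correspond to List.getD / List.set through toList
theorem pv_toList_getD (a : Array Int) (i : Nat) : a.toList.getD i 0 = a.getD i 0 := by
  simp [List.getD_eq_getElem?_getD, Array.getD_eq_getD_getElem?, Array.getElem?_toList]

theorem pv_innerA_toList (i : Int) (a : Array Int) (k : Int) :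
    (pvInnerA i a k).toList = pvInnerAL i a.toList k := by
  unfold pvInnerA pvInnerAL
  rw [Array.toList_setIfInBounds]
  simp

theorem pv_stepA_toList (a : Array Int) (i : Int) :
    (pvStepA a i).toList = pvStepAL a.toList i := by
  unfold pvStepA pvStepAL
  rw [← Array.toList_setIfInBounds]
  generalize a.setIfInBounds i.toNat 1 = a0
  induction (PySem.List.pyRange 1 (PySem.Int.floordiv i 2 + 1) 1) generalizing a0 with
  | nil => rfl
  | cons k ks ih => rw [List.foldl_cons, List.foldl_cons, ← pv_innerA_toList, ih]

theorem pv_getD_setIfInBounds (a : Array Int) (i j : Nat) (v : Int) :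
    (a.setIfInBounds i v).getD j 0 = (a.toList.set i v).getD j 0 := by
  rw [← pv_toList_getD, Array.toList_setIfInBounds]

theorem pv_stepB_toList (s : Array Int × Array Int) (i : Int) :
    ((pvStepB s i).1.toList, (pvStepB s i).2.toList) = pvStepBL (s.1.toList, s.2.toList) i := by
  unfold pvStepB pvStepBL
  simp only [Prod.mk.injEq]
  constructor
  · rw [Array.toList_setIfInBounds, pv_toList_getD]
  · rw [Array.toList_setIfInBounds, pv_getD_setIfInBounds]
    simp


-- getD/set facts
theorem pv_getD_set_self (l : List Int) (i : Nat) (v : Int) (h : i < l.length) :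
    (l.set i v).getD i 0 = v := by
  simp [List.getD_eq_getElem?_getD, h]

theorem pv_getD_set_ne (l : List Int) (i j : Nat) (v : Int) (h : i ≠ j) :
    (l.set i v).getD j 0 = l.getD j 0 := by
  simp [List.getD_eq_getElem?_getD, List.getElem?_set_ne h]

-- the inner loop of A adds the sum of the read entries
theorem pv_innerA_fold (i : Nat) (ks : List Int) (d : List Int) (a : Int)
    (hi : i < d.length) (hk : ∀ k ∈ ks, k.toNat ≠ i) :
    ks.foldl (pvInnerAL (i : Int)) (d.set i a)
      = d.set i (a + (ks.map (fun k => d.getD k.toNat 0)).sum) := by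
  induction ks generalizing a with
  | nil => simp
  | cons k rest ih =>
    have hki : k.toNat ≠ i := hk k (by simp)
    have : pvInnerAL (i : Int) (d.set i a) k = d.set i (a + d.getD k.toNat 0) := by
      rw [pvInnerAL, Int.toNat_natCast, pv_getD_set_self d i a hi,
        pv_getD_set_ne d i k.toNat a (Ne.symm hki), List.set_set]
    rw [List.foldl_cons, this, ih (a + d.getD k.toNat 0) (fun k hk' => hk k (by simp [hk']))]
    simp [add_assoc]

-- the joint loop invariant: the two dp lists coincide and pref holds prefix sums up to m
def pvInv (N : Nat) (d p : List Int) (m : Nat) : Prop :=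
  d.length = N ∧ p.length = N ∧
  ∀ j : Nat, j ≤ m →
    p.getD j 0 = ((PySem.List.pyRange 1 ((j : Int) + 1) 1).map (fun k => d.getD k.toNat 0)).sum

theorem pv_main (N : Nat) (_hN : 2 ≤ N) :
    ∀ m : Nat, 1 ≤ m → m < N →
      ((PySem.List.pyRange 2 ((m : Int) + 1) 1).foldl pvStepAL ((List.replicate N 0).set 1 1)
        = ((PySem.List.pyRange 2 ((m : Int) + 1) 1).foldl pvStepBL
            (((List.replicate N 0).set 1 1), ((List.replicate N 0).set 1 1))).1)
      ∧ pvInv N ((PySem.List.pyRange 2 ((m : Int) + 1) 1).foldl pvStepBL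
            (((List.replicate N 0).set 1 1), ((List.replicate N 0).set 1 1))).1
          ((PySem.List.pyRange 2 ((m : Int) + 1) 1).foldl pvStepBL
            (((List.replicate N 0).set 1 1), ((List.replicate N 0).set 1 1))).2 m := by
  intro m
  induction m with
  | zero => omega
  | succ m ih =>
    intro _ hlt
    by_cases hm : 1 ≤ m
    · -- inductive step: peel off i = m+1
      obtain ⟨heq, hlen_d, hlen_p, hpref⟩ := ih hm (by omega)
      set d0 : List Int := (List.replicate N 0).set 1 1 with hd0
      set s := (PySem.List.pyRange 2 ((m : Int) + 1) 1).foldl pvStepBL (d0, d0) with hs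
      have hrange : PySem.List.pyRange 2 ((m : Int) + 1 + 1) 1
          = PySem.List.pyRange 2 ((m : Int) + 1) 1 ++ [((m : Int) + 1)] := by
        exact PySem.List.pyRange_one_succ_right (by omega)
      have hcast : ((m + 1 : Nat) : Int) + 1 = (m : Int) + 1 + 1 := by push_cast; ring
      have hmi : ((m : Int) + 1).toNat = m + 1 := by omega
      have hfd : PySem.Int.floordiv ((m : Int) + 1) 2 = (((m + 1) / 2 : Nat) : Int) := by
        have : ((m : Int) + 1) = ((m + 1 : Nat) : Int) := by push_cast; ring
        rw [this]
        simp [PySem.Int.floordiv, Int.fdiv]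
      set h2 : Nat := (m + 1) / 2 with hh2
      have hh2m : h2 ≤ m := by omega
      -- A's step
      have hstepA : pvStepAL s.1 ((m : Int) + 1)
          = s.1.set (m + 1)
              (1 + ((PySem.List.pyRange 1 ((h2 : Int) + 1) 1).map (fun k => s.1.getD k.toNat 0)).sum) := by
        have hks : ∀ k ∈ PySem.List.pyRange 1 ((h2 : Int) + 1) 1, k.toNat ≠ m + 1 := by
          intro k hkmem
          rw [PySem.List.mem_pyRange_one] at hkmem
          omega
        have := pv_innerA_fold (m + 1) (PySem.List.pyRange 1 ((h2 : Int) + 1) 1) s.1 1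
          (by rw [← heq] at *; omega) hks
        rw [pvStepAL, hfd, hmi]
        have hcast2 : ((m + 1 : Nat) : Int) = (m : Int) + 1 := by push_cast; ring
        rw [hcast2] at this
        exact this
      -- B's step
      have hpval : s.2.getD h2 0
          = ((PySem.List.pyRange 1 ((h2 : Int) + 1) 1).map (fun k => s.1.getD k.toNat 0)).sum :=
        hpref h2 hh2m
      have hstepB1 : (pvStepBL s ((m : Int) + 1)).1
          = s.1.set (m + 1) (1 + s.2.getD h2 0) := by
        rw [pvStepBL, hfd, hmi]
        simp
      -- equal dp lists after the step
      have heq' : pvStepAL s.1 ((m : Int) + 1) = (pvStepBL s ((m : Int) + 1)).1 := by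
        rw [hstepA, hstepB1, hpval]
      constructor
      · rw [hcast, hrange]
        simp only [List.foldl_append, List.foldl_cons, List.foldl_nil]
        rw [← hs, heq, heq']
      · -- invariant at m+1
        rw [hcast, hrange]
        simp only [List.foldl_append, List.foldl_cons, List.foldl_nil]
        rw [← hs]
        set d' := (pvStepBL s ((m : Int) + 1)).1 with hd'
        set p' := (pvStepBL s ((m : Int) + 1)).2 with hp'
        have hd'def : d' = s.1.set (m + 1) (1 + s.2.getD h2 0) := hstepB1
        have hp'def : p' = s.2.set (m + 1) (s.2.getD m 0 + d'.getD (m + 1) 0) := by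
          rw [hp', pvStepBL, hmi]
          have : ((m : Int) + 1 - 1).toNat = m := by omega
          rw [this]
          simp [hd', pvStepBL, hmi]
        have hlen_d' : d'.length = N := by rw [hd'def]; simpa using hlen_d
        have hlen_p' : p'.length = N := by rw [hp'def]; simpa using hlen_p
        have hd'_lo : ∀ k : Nat, k ≤ m → d'.getD k 0 = s.1.getD k 0 := by
          intro k hk
          rw [hd'def]; exact pv_getD_set_ne _ _ _ _ (by omega)
        refine ⟨hlen_d', hlen_p', ?_⟩
        intro j hj
        by_cases hjm : j ≤ m
        · rw [hp'def, pv_getD_set_ne _ _ _ _ (by omega), hpref j hjm]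
          refine congrArg _ (List.map_congr_left ?_)
          intro k hkmem
          rw [PySem.List.mem_pyRange_one] at hkmem
          exact (hd'_lo k.toNat (by omega)).symm
        · have hj1 : j = m + 1 := by omega
          subst hj1
          rw [hp'def, pv_getD_set_self _ _ _ (by omega)]
          have hsplit : PySem.List.pyRange 1 ((m : Int) + 1 + 1) 1
              = PySem.List.pyRange 1 ((m : Int) + 1) 1 ++ [((m : Int) + 1)] :=
            PySem.List.pyRange_one_succ_right (by omega)
          have : (((m + 1 : Nat) : Int) + 1) = (m : Int) + 1 + 1 := by push_cast; ring
          rw [this, hsplit, List.map_append, List.sum_append]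
          have hlast : ([((m : Int) + 1)].map (fun k => d'.getD k.toNat 0)).sum
              = d'.getD (m + 1) 0 := by simp [hmi]
          rw [hlast]
          have hsum_lo : ((PySem.List.pyRange 1 ((m : Int) + 1) 1).map (fun k => d'.getD k.toNat 0)).sum
              = ((PySem.List.pyRange 1 ((m : Int) + 1) 1).map (fun k => s.1.getD k.toNat 0)).sum := by
            refine congrArg _ (List.map_congr_left ?_)
            intro k hkmem
            rw [PySem.List.mem_pyRange_one] at hkmem
            exact hd'_lo k.toNat (by omega)
          rw [hsum_lo, ← hpref m (le_refl m)]
    · -- base case m+1 = 1: empty outer range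
      have hm1 : m = 0 := by omega
      subst hm1
      have hnil : PySem.List.pyRange 2 ((0 : Int) + 1 + 1) 1 = [] :=
        PySem.List.pyRange_one_eq_nil (by norm_num)
      have hc : ((0 + 1 : Nat) : Int) + 1 = (0 : Int) + 1 + 1 := by norm_num
      rw [hc, hnil]
      simp only [List.foldl_nil]
      unfold pvInv
      refine ⟨trivial, by simp, by simp, ?_⟩
      intro j hj
      interval_cases j
      · have h0 : PySem.List.pyRange 1 (((0 : Nat) : Int) + 1) 1 = [] :=
          PySem.List.pyRange_one_eq_nil (by simp)
        rw [h0, pv_getD_set_ne (List.replicate N 0) 1 0 1 (by omega)]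
        simp
      · have h1 : PySem.List.pyRange 1 (((1 : Nat) : Int) + 1) 1 = [(1 : Int)] := by
          have := PySem.List.pyRange_one_singleton (a := (1 : Int))
          simp at this
          simpa using this
        rw [h1]
        simp only [List.map_cons, List.map_nil, List.sum_cons, List.sum_nil, add_zero]
        have h1N : 1 < N := by omega
        have hr : ((List.replicate N (0 : Int)).set 1 1).getD 1 0 = 1 :=
          pv_getD_set_self _ _ _ (by simp; exact h1N)
        simpa using hr

-- ===== VERDICT (by name: the statement is the Claim_ definition above) =====
theorem make_sequences_spec : Claim_equal_make_sequences := by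
  intro n _ hpre
  unfold Spec_make_sequences make_sequences make_sequences_alt
  have hpre' : 1 ≤ n := hpre
  have hA : ∀ (ks : List Int) (a : Array Int),
      (ks.foldl pvStepA a).toList = ks.foldl pvStepAL a.toList := by
    intro ks
    induction ks with
    | nil => intro a; rfl
    | cons x xs ih =>
      intro a
      rw [List.foldl_cons, List.foldl_cons, ih, pv_stepA_toList]
  have hB : ∀ (ks : List Int) (s : Array Int × Array Int),
      ((ks.foldl pvStepB s).1.toList, (ks.foldl pvStepB s).2.toList)
        = ks.foldl pvStepBL (s.1.toList, s.2.toList) := by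
    intro ks
    induction ks with
    | nil => intro s; rfl
    | cons x xs ih =>
      intro s
      rw [List.foldl_cons, List.foldl_cons, ih, pv_stepB_toList]
  have harr : ((Array.replicate (n + 1).toNat (0 : Int)).setIfInBounds 1 1).toList
      = (List.replicate (n + 1).toNat (0 : Int)).set 1 1 := by
    simp [Array.toList_setIfInBounds]
  have e1 : ((PySem.List.pyRange 2 (n + 1) 1).foldl pvStepA
        ((Array.replicate (n + 1).toNat 0).setIfInBounds 1 1)).toList
      = (PySem.List.pyRange 2 (n + 1) 1).foldl pvStepAL
        ((List.replicate (n + 1).toNat 0).set 1 1) := by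
    rw [hA, harr]
  have e2 : (((PySem.List.pyRange 2 (n + 1) 1).foldl pvStepB
        ((Array.replicate (n + 1).toNat 0).setIfInBounds 1 1,
         (Array.replicate (n + 1).toNat 0).setIfInBounds 1 1)).1).toList
      = ((PySem.List.pyRange 2 (n + 1) 1).foldl pvStepBL
        ((List.replicate (n + 1).toNat 0).set 1 1,
         (List.replicate (n + 1).toNat 0).set 1 1)).1 := by
    have := congrArg Prod.fst (hB (PySem.List.pyRange 2 (n + 1) 1)
      ((Array.replicate (n + 1).toNat 0).setIfInBounds 1 1,
       (Array.replicate (n + 1).toNat 0).setIfInBounds 1 1))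
    simpa [harr] using this
  rw [← pv_toList_getD, ← pv_toList_getD, e1, e2]
  set N := (n + 1).toNat with hN
  have hN2 : 2 ≤ N := by omega
  have hm1 : 1 ≤ n.toNat := by omega
  have hmN : n.toNat < N := by omega
  have hcast : ((n.toNat : Int) + 1) = n + 1 := by omega
  have := pv_main N hN2 n.toNat hm1 hmN
  rw [hcast] at this
  rw [this.1]
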